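-- pv_equiv track=rewrite | github.com/Aditya-A-Pardeshi/Coding-Hands-On | 4 Python_Programs/1 Problems on numbers/36_DiffBet_EvenFactorial_OddFactorial/Demo.py | FindDiff
-- ===== SOURCE A (Python) =====
-- def FindDiff(num):
--     if(num == 0):
--         return 0;
--     if(num<0):
--         num = -num;
--     EvenFactorial = 1;
--     OddFactorial = 1;
--     for i in range(1,num+1):
--         if(i%2 == 0):
--             EvenFactorial = EvenFactorial * i;
--         else:
--             OddFactorial = OddFactorial * i;
--     return (EvenFactorial - OddFactorial);
-- ===== SOURCE B (Python) =====
-- def _fact(m):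
--     r = 1
--     for j in range(2, m + 1):
--         r *= j
--     return r
--
-- def FindDiff(num):
--     if num == 0:
--         return 0
--     n = -num if num < 0 else num
--     k = n // 2
--     even = 2 ** k * _fact(k)        # product of the even numbers up to n
--     return even - _fact(n) // even  # odd product = n! // even product (exact)
-- ===== Notes on version B (the rewrite author's own statement) =====
-- stated objective: alternative
-- what changed: Replaces the single parity-branching loop that maintains both running products by closed-form factorial algebra: the even product is a power-of-two times a half-bound factorial, and the odd product is recovered by exact integer division from the full factorial.
import Mathlib
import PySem

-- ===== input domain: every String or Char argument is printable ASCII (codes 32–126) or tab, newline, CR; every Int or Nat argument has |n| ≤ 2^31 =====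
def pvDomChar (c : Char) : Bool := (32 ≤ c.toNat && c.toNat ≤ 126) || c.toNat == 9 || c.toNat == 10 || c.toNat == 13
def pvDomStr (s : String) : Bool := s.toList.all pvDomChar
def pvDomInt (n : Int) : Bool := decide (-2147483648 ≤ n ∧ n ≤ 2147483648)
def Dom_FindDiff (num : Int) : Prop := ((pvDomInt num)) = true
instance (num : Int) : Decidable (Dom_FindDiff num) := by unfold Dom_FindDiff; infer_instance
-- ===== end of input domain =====

-- B derives both products in closed form (evens = 2^k * k!, odds = n! // evens) instead of A's parity-branching loop; alternative decomposition, no speed claim.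
-- ===== PORT A =====
def FindDiff (num : Int) : Int :=
  if num == 0 then 0
  else
    let n := if num < 0 then -num else num
    let p := (PySem.List.pyRange 1 (n + 1) 1).foldl
      (fun (st : Int × Int) i =>
        if PySem.Int.mod i 2 == 0 then (st.1 * i, st.2) else (st.1, st.2 * i)) (1, 1)
    p.1 - p.2

-- ===== PORT B =====
-- helper _fact: r = 1; for j in range(2, m+1): r *= j
def pvFactB (m : Int) : Int :=
  (PySem.List.pyRange 2 (m + 1) 1).foldl (fun r j => r * j) 1

def FindDiff_alt (num : Int) : Int :=
  if num == 0 then 0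
  else
    let n := if num < 0 then -num else num
    let k := PySem.Int.floordiv n 2
    let even := 2 ^ k.toNat * pvFactB k   -- 2 ** k (k ≥ 0 here)
    even - PySem.Int.floordiv (pvFactB n) even

-- ===== PRECONDITION & SPEC =====
def Spec_FindDiff (num : Int) (out : Int) : Prop := out = FindDiff_alt num
instance (num : Int) (out : Int) : Decidable (Spec_FindDiff num out) := by unfold Spec_FindDiff; infer_instance

-- ===== CLAIM (what is proved, stated in full; the proofs are below) =====
def Claim_equal_FindDiff : Prop := ∀ (num : Int), Dom_FindDiff num → Spec_FindDiff num (FindDiff num)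

-- ===== LEMMAS AND PROOFS =====

-- ===== VERDICT (by name: the statement is the Claim_ definition above) =====
-- mathematical even/odd running products of A's loop
def pvEP : Nat → Int
  | 0 => 1
  | n + 1 => if (n + 1) % 2 = 0 then pvEP n * (n + 1) else pvEP n

def pvOP : Nat → Int
  | 0 => 1
  | n + 1 => if (n + 1) % 2 = 0 then pvOP n else pvOP n * (n + 1)

theorem pvLoop_eq (n : Nat) :
    ((PySem.List.pyRange 1 ((n : Int) + 1) 1).foldl
      (fun (st : Int × Int) i =>
        if PySem.Int.mod i 2 == 0 then (st.1 * i, st.2) else (st.1, st.2 * i)) (1, 1))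
    = (pvEP n, pvOP n) := by
  induction n with
  | zero => simp [PySem.List.pyRange_one_eq_nil, pvEP, pvOP]
  | succ n ih =>
      have hc : ((n + 1 : Nat) : Int) + 1 = ((n : Int) + 1) + 1 := by push_cast; ring
      rw [hc, PySem.List.pyRange_one_succ_right (by omega), List.foldl_append, ih]
      have hm : PySem.Int.mod ((n : Int) + 1) 2 = (((n + 1) % 2 : Nat) : Int) := by
        have := PySem.Int.mod_natCast (n + 1) 2
        push_cast at this ⊢
        omega
      simp only [List.foldl_cons, List.foldl_nil, hm]
      by_cases h : (n + 1) % 2 = 0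
      · rw [h]
        simp [pvEP, pvOP, h]
      · have h1 : (n + 1) % 2 = 1 := by omega
        rw [h1]
        simp [pvEP, pvOP, h]

theorem pvEP_eq (n : Nat) : pvEP n = 2 ^ (n / 2) * ((n / 2).factorial : Int) := by
  induction n with
  | zero => simp [pvEP]
  | succ n ih =>
      by_cases h : (n + 1) % 2 = 0
      · have h1 : (n + 1) / 2 = n / 2 + 1 := by omega
        have h2 : (n + 1 : Int) = 2 * ((n / 2 : Nat) + 1 : Nat) := by push_cast; omega
        simp only [pvEP, h, if_pos, ih, h1, Nat.factorial_succ]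
        push_cast
        rw [h2]
        push_cast
        ring
      · have h1 : (n + 1) / 2 = n / 2 := by omega
        simp [pvEP, h, ih, h1]

theorem pvEP_mul_pvOP (n : Nat) : pvEP n * pvOP n = (n.factorial : Int) := by
  induction n with
  | zero => simp [pvEP, pvOP]
  | succ n ih =>
      by_cases h : (n + 1) % 2 = 0 <;>
        · simp [pvEP, pvOP, h, Nat.factorial_succ]
          rw [← ih]
          ring

theorem pvFactB_eq (m : Nat) : pvFactB (m : Int) = (m.factorial : Int) := by
  induction m with
  | zero => simp [pvFactB, PySem.List.pyRange_one_eq_nil]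
  | succ m ih =>
      rcases Nat.eq_zero_or_pos m with hm | hm
      · subst hm
        simp [pvFactB, PySem.List.pyRange_one_eq_nil]
      · have hc : ((m + 1 : Nat) : Int) + 1 = ((m : Int) + 1) + 1 := by push_cast; ring
        unfold pvFactB
        rw [hc, PySem.List.pyRange_one_succ_right (by exact_mod_cast by omega),
          List.foldl_append]
        have : ((PySem.List.pyRange 2 ((m : Int) + 1) 1).foldl (fun r j => r * j) 1)
            = pvFactB (m : Int) := rfl
        rw [this, ih]
        simp [Nat.factorial_succ]
        ring

theorem pvFindDiff_eq (num : Int) (m : Nat) (h0 : num ≠ 0)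
    (hm : (if num < 0 then -num else num) = (m : Int)) :
    FindDiff num = pvEP m - pvOP m := by
  unfold FindDiff
  rw [if_neg (by simpa using h0)]
  simp only [hm, pvLoop_eq]

theorem pvFindDiff_alt_eq (num : Int) (m : Nat) (h0 : num ≠ 0)
    (hm : (if num < 0 then -num else num) = (m : Int)) :
    FindDiff_alt num = pvEP m - pvOP m := by
  unfold FindDiff_alt
  rw [if_neg (by simpa using h0)]
  have hk : PySem.Int.floordiv (m : Int) 2 = ((m / 2 : Nat) : Int) := by
    exact_mod_cast PySem.Int.floordiv_natCast m 2
  simp only [hm, hk, pvFactB_eq, Int.toNat_natCast]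
  rw [← pvEP_eq]
  have hpos : 0 < pvEP m := by rw [pvEP_eq]; positivity
  rw [PySem.Int.floordiv_eq_ediv_of_pos hpos, ← pvEP_mul_pvOP,
    Int.mul_ediv_cancel_left _ (ne_of_gt hpos)]

theorem FindDiff_spec : Claim_equal_FindDiff := by
  intro num _
  unfold Spec_FindDiff
  by_cases h0 : num = 0
  · simp [FindDiff, FindDiff_alt, h0]
  · obtain ⟨m, hm⟩ : ∃ m : Nat, (if num < 0 then -num else num) = (m : Int) := by
      refine ⟨(if num < 0 then -num else num).toNat, ?_⟩
      split_ifs with h <;> omega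
    rw [pvFindDiff_eq num m h0 hm, pvFindDiff_alt_eq num m h0 hm]
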